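-- pv_equiv track=rewrite | github.com/MilesBlackwood/pythonProgramming | work/cwk1.py | valid_char_in_string
-- ===== SOURCE A (Python) =====
-- def valid_char_in_string(popList: list, charSet: list) -> bool:
--     if isinstance(charSet, list):
--         for char in charSet:
--             if len(char) != 1:
--                 return False # invalid character set - list doesn't contain individual characters
--         for string in popList:
--             for char in string:
--                 inSet = False
--                 for item in charSet:
--                     if char == item:
--                         inSet = True
--                 if inSet == False:
--                     return False # Not all characters are in the character set
--         return True # All characters in each string are in the character set
--     else:
--         return False # invalid character set - not a list
-- ===== SOURCE B (Python) =====
-- def valid_char_in_string(popList: list, charSet: list) -> bool: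
--     if not isinstance(charSet, list):
--         return False
--     if any(len(ch) != 1 for ch in charSet):
--         return False  # invalid character set
--     used = set()
--     for string in popList:
--         used.update(string)
--     return all(ch in charSet for ch in used)
-- ===== Notes on version B (the rewrite author's own statement) =====
-- stated objective: alternative
-- what changed: A rescans charSet for every character of every string with a nested flag loop; B builds the set of distinct characters used across popList once and membership-tests only those distinct characters against charSet.
import Mathlib
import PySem

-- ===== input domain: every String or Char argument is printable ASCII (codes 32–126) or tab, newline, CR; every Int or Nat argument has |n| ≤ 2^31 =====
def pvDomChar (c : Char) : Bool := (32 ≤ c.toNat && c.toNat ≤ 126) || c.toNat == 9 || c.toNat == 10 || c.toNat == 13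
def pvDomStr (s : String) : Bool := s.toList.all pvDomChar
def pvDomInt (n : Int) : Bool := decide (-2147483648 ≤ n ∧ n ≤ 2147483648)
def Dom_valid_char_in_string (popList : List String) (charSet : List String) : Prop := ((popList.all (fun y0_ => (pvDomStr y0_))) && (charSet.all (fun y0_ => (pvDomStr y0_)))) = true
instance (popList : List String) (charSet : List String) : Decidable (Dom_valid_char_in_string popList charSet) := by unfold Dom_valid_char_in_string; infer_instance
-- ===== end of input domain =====

-- B aggregates the distinct characters used into a set once and checks each against charSet,
-- instead of A's per-character rescan of charSet; alternative decomposition, same return value.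


-- ===== PORT A =====
-- first loop: return False on any charSet element whose len != 1
def pvA_validSet : List String → Bool
  | [] => true
  | c :: rest => if PySem.Str.len c ≠ 1 then false else pvA_validSet rest

-- inner 'for item in charSet' scan setting inSet (no early exit in A)
def pvA_inSet (c : Char) (charSet : List String) : Bool :=
  charSet.foldl (fun inSet item => if String.ofList [c] == item then true else inSet) false

-- 'for char in string' with early return False
def pvA_checkChars : List Char → List String → Bool
  | [], _ => true
  | c :: rest, cs => if pvA_inSet c cs = false then false else pvA_checkChars rest cs

-- 'for string in popList' with early return False
def pvA_checkStrings : List String → List String → Bool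
  | [], _ => true
  | s :: rest, cs => if pvA_checkChars s.toList cs then pvA_checkStrings rest cs else false

def valid_char_in_string (popList : List String) (charSet : List String) : Bool :=
  -- isinstance(charSet, list) is always true under the List String typing
  if pvA_validSet charSet then pvA_checkStrings popList charSet else false

-- ===== PORT B =====
def valid_char_in_string_alt (popList : List String) (charSet : List String) : Bool :=
  if charSet.any (fun ch => PySem.Str.len ch != 1) then false
  else
    -- used = set(); for string in popList: used.update(string)
    let used : PySem.Set Char :=
      popList.foldl (fun u s => PySem.Set.update u s.toList) PySem.Set.empty
    used.all (fun c => charSet.contains (String.ofList [c]))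

-- ===== PRECONDITION & SPEC =====
def Spec_valid_char_in_string (popList : List String) (charSet : List String) (out : Bool) : Prop := out = valid_char_in_string_alt popList charSet
instance (popList : List String) (charSet : List String) (out : Bool) : Decidable (Spec_valid_char_in_string popList charSet out) := by unfold Spec_valid_char_in_string; infer_instance

-- ===== CLAIM (what is proved, stated in full; the proofs are below) =====
def Claim_equal_valid_char_in_string : Prop := ∀ (popList : List String) (charSet : List String), Dom_valid_char_in_string popList charSet → Spec_valid_char_in_string popList charSet (valid_char_in_string popList charSet)

-- ===== LEMMAS AND PROOFS =====

lemma validSet_eq (cs : List String) :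
    pvA_validSet cs = !cs.any (fun ch => PySem.Str.len ch != 1) := by
  induction cs with
  | nil => rfl
  | cons c rest ih =>
    simp only [pvA_validSet, List.any_cons, Bool.not_or]
    split_ifs with h <;> simp_all

lemma inSet_eq (c : Char) (cs : List String) :
    pvA_inSet c cs = cs.contains (String.ofList [c]) := by
  unfold pvA_inSet
  rw [PySem.List.foldl_if_true_eq]
  simp only [Bool.false_or, List.any_beq]

lemma checkChars_eq (l : List Char) (cs : List String) :
    pvA_checkChars l cs = l.all (fun c => cs.contains (String.ofList [c])) := by
  induction l with
  | nil => rfl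
  | cons c rest ih =>
    simp only [pvA_checkChars, inSet_eq, List.all_cons]
    split_ifs with h <;> simp_all

lemma checkStrings_eq (ls : List String) (cs : List String) :
    pvA_checkStrings ls cs = ls.all (fun s => s.toList.all (fun c => cs.contains (String.ofList [c]))) := by
  induction ls with
  | nil => rfl
  | cons s rest ih =>
    simp only [pvA_checkStrings, checkChars_eq, List.all_cons]
    split_ifs with h <;> simp_all

lemma mem_update_iff {x : Char} (u : PySem.Set Char) (l : List Char) :
    x ∈ PySem.Set.update u l ↔ x ∈ u ∨ x ∈ l := by
  induction l generalizing u with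
  | nil => simp [PySem.Set.update]
  | cons c rest ih =>
    simp only [PySem.Set.update, List.foldl_cons] at *
    rw [ih]
    simp [PySem.Set.mem_add, List.mem_cons]
    tauto

lemma mem_used_iff (x : Char) (popList : List String) (u : PySem.Set Char) :
    x ∈ popList.foldl (fun u s => PySem.Set.update u s.toList) u ↔
      x ∈ u ∨ ∃ s ∈ popList, x ∈ s.toList := by
  induction popList generalizing u with
  | nil => simp
  | cons s rest ih =>
    simp only [List.foldl_cons]
    rw [ih, mem_update_iff]
    simp
    tauto

-- ===== VERDICT (by name: the statement is the Claim_ definition above) =====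
theorem valid_char_in_string_spec : Claim_equal_valid_char_in_string := by
  intro popList charSet _
  unfold Spec_valid_char_in_string valid_char_in_string valid_char_in_string_alt
  rw [validSet_eq]
  cases h : charSet.any (fun ch => PySem.Str.len ch != 1) with
  | true => simp
  | false =>
    simp only [Bool.not_false, if_true, if_false, Bool.false_eq_true]
    rw [checkStrings_eq, Bool.eq_iff_iff]
    simp only [List.all_eq_true]
    constructor
    · intro hall x hx
      rcases (mem_used_iff x popList PySem.Set.empty).mp hx with h' | ⟨s, hs, hc⟩
      · simp [PySem.Set.empty] at h'
      · exact hall s hs x hc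
    · intro hall s hs x hc
      exact hall x ((mem_used_iff x popList PySem.Set.empty).mpr (Or.inr ⟨s, hs, hc⟩))
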